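-- pv_equiv track=rewrite | github.com/theBappy/python-fundamentals-with-projects | password_projects/meter_pass.py | symbols
-- ===== SOURCE A (Python) =====
-- import string
--
-- exceptions = "_ "
--
-- sequenceNumbers = "0123456789"
--
-- sequenceAlphabet = string.ascii_lowercase
--
-- def symbols(password):
--     charsSymbol = sum(
--         1
--         for i in password
--         if i.lower() not in sequenceAlphabet
--         and i not in exceptions
--         and i not in sequenceNumbers
--     )
--     return charsSymbol * 6
-- ===== SOURCE B (Python) =====
-- import string
--
-- exceptions = "_ "
--
-- sequenceNumbers = "0123456789"
--
-- sequenceAlphabet = string.ascii_lowercase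
--
-- def symbols(password):
--     # Build a char -> count frequency table once, then sum counts over the
--     # distinct characters that are symbols.
--     freq = {}
--     for ch in password:
--         freq[ch] = freq.get(ch, 0) + 1
--     total = 0
--     for ch, cnt in freq.items():
--         if (
--             ch.lower() not in sequenceAlphabet
--             and ch not in exceptions
--             and ch not in sequenceNumbers
--         ):
--             total += cnt
--     return total * 6
-- ===== Notes on version B (the rewrite author's own statement) =====
-- stated objective: alternative
-- what changed: B replaces A's single per-character generator sum with a two-phase algorithm: it first builds a char->count frequency table, then sums the counts of the distinct characters satisfying the symbol predicate.
import Mathlib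
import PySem

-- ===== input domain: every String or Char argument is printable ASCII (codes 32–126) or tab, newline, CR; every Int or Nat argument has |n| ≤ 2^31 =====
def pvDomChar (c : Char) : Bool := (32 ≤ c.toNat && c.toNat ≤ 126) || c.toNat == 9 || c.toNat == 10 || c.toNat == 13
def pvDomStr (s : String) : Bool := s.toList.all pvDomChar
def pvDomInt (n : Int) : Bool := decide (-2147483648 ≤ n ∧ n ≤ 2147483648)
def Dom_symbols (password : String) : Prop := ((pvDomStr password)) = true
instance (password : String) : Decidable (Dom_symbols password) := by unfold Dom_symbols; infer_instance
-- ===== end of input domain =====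

-- B builds a char→count frequency table first and sums counts over the distinct symbol
-- characters, instead of A's single per-character generator sum; same return value.

-- ===== PORT A =====
-- shared per-character predicate: 'i.lower() not in sequenceAlphabet and i not in "_ "
-- and i not in "0123456789"'; for a single character, Python's substring test 'in'
-- coincides with character membership, so list membership is exact here.
def symPred (c : Char) : Bool :=
  !("abcdefghijklmnopqrstuvwxyz".toList.contains (PySem.Chars.lowerChar c))
    && !("_ ".toList.contains c) && !("0123456789".toList.contains c)

def symbols (password : String) : Int :=
  (password.toList.foldl (fun acc c => if symPred c then acc + 1 else acc) 0) * 6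

-- ===== PORT B =====
def symbols_alt (password : String) : Int :=
  let freq := password.toList.foldl
    (fun d c => d.insert c (d.getD c 0 + 1)) (PySem.Dict.empty : PySem.Dict Char Int)
  let total := freq.items.foldl (fun acc p => if symPred p.1 then acc + p.2 else acc) 0
  total * 6

-- ===== PRECONDITION & SPEC =====
def Spec_symbols (password : String) (out : Int) : Prop := out = symbols_alt password
instance (password : String) (out : Int) : Decidable (Spec_symbols password out) := by unfold Spec_symbols; infer_instance

-- ===== CLAIM (what is proved, stated in full; the proofs are below) =====
def Claim_equal_symbols : Prop := ∀ (password : String), Dom_symbols password → Spec_symbols password (symbols password)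

-- ===== LEMMAS AND PROOFS =====

-- an 'if p then acc + f x else acc' fold is the sum of 0/f-values
theorem foldl_if_add_eq_sum {α : Type} (p : α → Bool) (f : α → Int) (l : List α) (a : Int) :
    l.foldl (fun acc x => if p x then acc + f x else acc) a
      = a + (l.map (fun x => if p x then f x else 0)).sum := by
  induction l generalizing a with
  | nil => simp
  | cons x t ih => simp [List.foldl_cons, ih]; split <;> ring

-- summing counts over any nodup cover of xs's elements equals summing 1 per element
theorem sum_counts_eq (l : List Char) (hnd : l.Nodup) :
    ∀ (xs : List Char), (∀ c ∈ xs, c ∈ l) →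
    (l.map (fun k => if symPred k then (xs.count k : Int) else 0)).sum
      = (xs.map (fun c => if symPred c then (1 : Int) else 0)).sum := by
  induction l with
  | nil =>
    intro xs hmem
    have : xs = [] := by
      cases xs with
      | nil => rfl
      | cons c t => exact absurd (hmem c (by simp)) (by simp)
    simp [this]
  | cons k t ih =>
    intro xs hmem
    have hknt : k ∉ t := (List.nodup_cons.mp hnd).1
    have hndt : t.Nodup := (List.nodup_cons.mp hnd).2
    -- split xs by equality with k
    have hperm : List.Perm ((xs.filter (· == k)) ++ (xs.filter (fun c => !(c == k)))) xs :=
      List.filter_append_perm _ xs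
    have hsum :
        (xs.map (fun c => if symPred c then (1 : Int) else 0)).sum
          = ((xs.filter (· == k)).map (fun c => if symPred c then (1 : Int) else 0)).sum
            + ((xs.filter (fun c => !(c == k))).map (fun c => if symPred c then (1 : Int) else 0)).sum := by
      rw [← List.sum_append, ← List.map_append]
      exact (List.Perm.sum_eq (hperm.map _)).symm
    have hrepl : xs.filter (· == k) = List.replicate (xs.count k) k := List.filter_beq (l := xs) (a := k)
    have hhead : ((xs.filter (· == k)).map (fun c => if symPred c then (1 : Int) else 0)).sum
        = (if symPred k then (xs.count k : Int) else 0) := by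
      rw [hrepl]
      simp [List.map_replicate, List.sum_replicate]
    set xs' := xs.filter (fun c => !(c == k)) with hxs'
    have hmem' : ∀ c ∈ xs', c ∈ t := by
      intro c hc
      have h1 := List.of_mem_filter hc
      have h2 := List.mem_of_mem_filter hc
      have hck : c ≠ k := by simpa using h1
      rcases List.mem_cons.mp (hmem c h2) with h | h
      · exact absurd h hck
      · exact h
    have hcount : ∀ c ∈ t, xs'.count c = xs.count c := by
      intro c hc
      have hck : c ≠ k := fun h => hknt (h ▸ hc)
      rw [hxs']
      rw [List.count_filter]
      simp [hck]
    have htail :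
        (t.map (fun c => if symPred c then (xs.count c : Int) else 0)).sum
          = (t.map (fun c => if symPred c then (xs'.count c : Int) else 0)).sum := by
      congr 1
      apply List.map_congr_left
      intro c hc
      rw [hcount c hc]
    calc ((k :: t).map (fun c => if symPred c then (xs.count c : Int) else 0)).sum
        = (if symPred k then (xs.count k : Int) else 0)
            + (t.map (fun c => if symPred c then (xs.count c : Int) else 0)).sum := by simp
      _ = (if symPred k then (xs.count k : Int) else 0)
            + (xs'.map (fun c => if symPred c then (1 : Int) else 0)).sum := by
            rw [htail, ih hndt xs' hmem']
      _ = (xs.map (fun c => if symPred c then (1 : Int) else 0)).sum := by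
            rw [hsum, hhead]

-- ===== VERDICT (by name: the statement is the Claim_ definition above) =====
theorem symbols_spec : Claim_equal_symbols := by
  intro password _
  unfold Spec_symbols symbols symbols_alt
  dsimp only
  set xs := password.toList with hxs
  rw [PySem.Dict.foldl_insert_getD_add_one_eq_counter, PySem.Dict.items_counter,
    List.foldl_map]
  rw [foldl_if_add_eq_sum, foldl_if_add_eq_sum]
  simp only [zero_add]
  congr 1
  exact (sum_counts_eq (PySem.Set.ofList xs) (PySem.Set.nodup_ofList xs) xs
    (fun c hc => (PySem.Set.mem_ofList xs c).mpr hc)).symm
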